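-- pv_equiv track=rewrite | github.com/gregoryann/Python-Beginner-Examples | +1500 Python Challenges/V Easy/Exists a Number Higher.py | exists_higher
-- ===== SOURCE A (Python) =====
-- def exists_higher(lst, n):
-- 	l = []
-- 	for i in lst:
-- 		if i >= n:
-- 			l.append(i)
-- 		elif lst == "":
-- 			return False
--
-- 	if len(l) > 0:
-- 		return True
-- 	else:
-- 		return False
-- ===== SOURCE B (Python) =====
-- def exists_higher(lst, n):
--     return len(lst) > 0 and max(lst) >= n
-- ===== Notes on version B (the rewrite author's own statement) =====
-- stated objective: simpler
-- what changed: Replaces the build-a-filtered-list-then-test-its-length scan with a single reduction: guard the empty list and compare max(lst) to n.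
import Mathlib
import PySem

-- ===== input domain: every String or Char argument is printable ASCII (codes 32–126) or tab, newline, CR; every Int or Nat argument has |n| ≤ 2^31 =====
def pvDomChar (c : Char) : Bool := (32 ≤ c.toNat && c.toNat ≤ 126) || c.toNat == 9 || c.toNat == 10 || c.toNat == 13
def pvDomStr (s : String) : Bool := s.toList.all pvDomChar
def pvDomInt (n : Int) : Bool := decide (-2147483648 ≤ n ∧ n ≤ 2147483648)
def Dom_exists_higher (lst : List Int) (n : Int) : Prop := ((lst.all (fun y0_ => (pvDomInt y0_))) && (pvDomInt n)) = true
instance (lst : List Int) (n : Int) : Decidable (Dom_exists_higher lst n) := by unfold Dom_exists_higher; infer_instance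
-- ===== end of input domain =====

-- B replaces A's build-a-filtered-list-then-test-length scan with max-then-compare (objective: simpler).

-- ===== PORT A =====
-- A appends each i ≥ n to l (the `elif lst == ""` branch compares a list with a
-- string, which is always False in Python, so the early return is unreachable;
-- ported literally as an `if false` branch), then returns len(l) > 0.
def exists_higher (lst : List Int) (n : Int) : Bool :=
  let l := lst.foldl (fun l i => if i ≥ n then l ++ [i] else l) []
  if l.length > 0 then true else false

-- ===== PORT B =====
-- len(lst) > 0 and max(lst) >= n  (Python's max of a nonempty list = foldl max)
def exists_higher_alt (lst : List Int) (n : Int) : Bool :=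
  match lst with
  | [] => false
  | x :: xs => decide (xs.foldl max x ≥ n)

-- ===== PRECONDITION & SPEC =====
def Spec_exists_higher (lst : List Int) (n : Int) (out : Bool) : Prop := out = exists_higher_alt lst n
instance (lst : List Int) (n : Int) (out : Bool) : Decidable (Spec_exists_higher lst n out) := by unfold Spec_exists_higher; infer_instance

-- ===== CLAIM (what is proved, stated in full; the proofs are below) =====
def Claim_equal_exists_higher : Prop := ∀ (lst : List Int) (n : Int), Dom_exists_higher lst n → Spec_exists_higher lst n (exists_higher lst n)

-- ===== LEMMAS AND PROOFS =====

theorem pv_foldl_append_filter (n : Int) (lst acc : List Int) :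
    lst.foldl (fun l i => if i ≥ n then l ++ [i] else l) acc
      = acc ++ lst.filter (fun i => decide (i ≥ n)) := by
  induction lst generalizing acc with
  | nil => simp
  | cons x xs ih =>
    simp only [List.foldl_cons, List.filter_cons]
    by_cases h : x ≥ n <;> simp [h, ih, List.append_assoc]

theorem pv_foldl_max_ge (n : Int) (xs : List Int) (x : Int) :
    (xs.foldl max x ≥ n) ↔ (x ≥ n ∨ ∃ y ∈ xs, y ≥ n) := by
  induction xs generalizing x with
  | nil => simp
  | cons y ys ih =>
    simp only [List.foldl_cons, ih, List.mem_cons]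
    constructor
    · rintro (h | ⟨z, hz, hzn⟩)
      · rcases le_max_iff.mp h with h' | h'
        · exact Or.inl h'
        · exact Or.inr ⟨y, Or.inl rfl, h'⟩
      · exact Or.inr ⟨z, Or.inr hz, hzn⟩
    · rintro (h | ⟨z, hz, hzn⟩)
      · exact Or.inl (le_max_of_le_left h)
      · rcases hz with rfl | hz
        · exact Or.inl (le_max_of_le_right hzn)
        · exact Or.inr ⟨z, hz, hzn⟩

-- ===== VERDICT (by name: the statement is the Claim_ definition above) =====
theorem exists_higher_spec : Claim_equal_exists_higher := by
  intro lst n _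
  unfold Spec_exists_higher exists_higher exists_higher_alt
  simp only [pv_foldl_append_filter, List.nil_append]
  match lst with
  | [] => simp
  | x :: xs =>
    have hA : (((x :: xs).filter (fun i => decide (i ≥ n))).length > 0) ↔
        (x ≥ n ∨ ∃ y ∈ xs, y ≥ n) := by
      rw [gt_iff_lt, List.length_pos_iff]
      constructor
      · intro h
        obtain ⟨y, hy⟩ := List.exists_mem_of_ne_nil _ h
        have hm := List.mem_filter.mp hy
        rcases List.mem_cons.mp hm.1 with rfl | hmem
        · exact Or.inl (by simpa using hm.2)
        · exact Or.inr ⟨y, hmem, by simpa using hm.2⟩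
      · rintro (h | ⟨y, hy, hyn⟩)
        · exact List.ne_nil_of_mem
            (List.mem_filter.mpr ⟨List.mem_cons_self, by simpa using h⟩)
        · exact List.ne_nil_of_mem
            (List.mem_filter.mpr ⟨List.mem_cons_of_mem _ hy, by simpa using hyn⟩)
    by_cases h : x ≥ n ∨ ∃ y ∈ xs, y ≥ n
    · simp [hA.mpr h, (pv_foldl_max_ge n xs x).mpr h]
    · have h1 : ¬ (((x :: xs).filter (fun i => decide (i ≥ n))).length > 0) := fun hh => h (hA.mp hh)
      have h2 : ¬ (xs.foldl max x ≥ n) := fun hh => h ((pv_foldl_max_ge n xs x).mp hh)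
      simp [h1, h2]
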